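-- pv_equiv track=rewrite | github.com/anjli01/Python-Functions | 29.py | merge_dictionary_lists
-- ===== SOURCE A (Python) =====
-- from typing import (
--     Any,
--     Dict,
--     Generator,
--     Iterable,
--     List,
--     Optional,
--     Set,
--     Tuple,
--     Union,
-- )
--
-- def merge_dictionary_lists(list1: List[Dict], list2: List[Dict]) -> List[Dict]:
--     """Merges two lists of dictionaries element-wise.
--
--     For each index `i`, it merges `list2[i]` into `list1[i]`, adding new keys
--     from `list2` without overwriting existing keys in `list1`.
--     Assumes lists are of the same length.
--
--     Args:
--         list1: The base list of dictionaries.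
--         list2: The list of dictionaries to merge from.
--
--     Returns:
--         The modified first list with merged dictionaries.
--     """
--     if len(list1) != len(list2):
--         raise ValueError("Input lists must be of the same length.")
--
--     for i, dict1 in enumerate(list1):
--         dict2 = list2[i]
--         for key, value in dict2.items():
--             if key not in dict1:
--                 dict1[key] = value
--     return list1
-- ===== SOURCE B (Python) =====
-- def merge_dictionary_lists(list1, list2):
--     """Element-wise merge via last-writer-wins dict unpacking: {**d1, **d2, **d1}
--     lays out d1's keys first, appends d2's new keys, and the final **d1 restores
--     d1's values on common keys -- no per-key membership test.  Returns a NEW list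
--     of NEW dicts (no in-place mutation, unlike A); the returned values are identical."""
--     if len(list1) != len(list2):
--         raise ValueError("Input lists must be of the same length.")
--     return [{**d1, **d2, **d1} for d1, d2 in zip(list1, list2)]
-- ===== Notes on version B (the rewrite author's own statement) =====
-- stated objective: idiomatic
-- what changed: Replaces A's in-place index loop with its per-key membership-test-and-assign branch by a comprehension over zip that builds each merged dict as the triple unpacking {**d1, **d2, **d1}, relying on dict last-writer-wins overwrite semantics (d1's keys first, d2's new keys appended, final **d1 restores d1's values) with no membership test at all; returns a new list instead of mutating list1.
import Mathlib
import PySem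

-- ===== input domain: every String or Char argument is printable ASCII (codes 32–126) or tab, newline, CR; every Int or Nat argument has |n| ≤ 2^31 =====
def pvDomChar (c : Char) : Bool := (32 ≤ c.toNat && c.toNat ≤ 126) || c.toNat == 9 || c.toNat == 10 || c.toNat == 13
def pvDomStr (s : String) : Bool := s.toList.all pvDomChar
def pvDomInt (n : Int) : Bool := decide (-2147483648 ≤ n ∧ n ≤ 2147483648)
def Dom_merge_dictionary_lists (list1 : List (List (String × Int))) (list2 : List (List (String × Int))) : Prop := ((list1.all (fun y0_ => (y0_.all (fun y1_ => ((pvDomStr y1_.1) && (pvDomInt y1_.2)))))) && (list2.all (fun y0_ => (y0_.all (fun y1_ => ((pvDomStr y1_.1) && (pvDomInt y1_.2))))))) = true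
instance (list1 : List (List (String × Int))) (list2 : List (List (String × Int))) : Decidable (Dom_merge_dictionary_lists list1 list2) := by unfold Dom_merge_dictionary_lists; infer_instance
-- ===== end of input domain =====

-- B replaces A's in-place per-key membership-test loop by one comprehension over zip building
-- each merged dict as the triple unpacking {**d1, **d2, **d1} — last-writer-wins overwrite
-- semantics lay out d1's keys, append d2's new keys, and restore d1's values, with no membership
-- branch at all (idiomatic; same cost).  A mutates list1's dicts in place and returns list1;
-- B returns a new list of new dicts — the equivalence proved here is about the RETURN value only.

-- ===== PORT A =====
-- inner loop: for key, value in dict2.items(): if key not in dict1: dict1[key] = value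
-- ('key not in dict1' is a key-membership test; assigning a FRESH key appends it)
def pvAddMissingA (d1 : List (String × Int)) (d2 : List (String × Int)) : List (String × Int) :=
  d2.foldl (fun dict1 kv =>
    if dict1.any (fun p => p.1 == kv.1) then dict1 else dict1 ++ [(kv.1, kv.2)]) d1

-- outer loop: for i, dict1 in enumerate(list1): dict2 = list2[i]; … — each dict of list1 is
-- replaced in place by its merged version (list positions unchanged), hence the map over
-- enumerate.  list2[i] is always in range under Pre_ (equal lengths), so pyGetD's default []
-- is unreachable; the length-mismatch ValueError is excluded by Pre_.
def merge_dictionary_lists (list1 : List (List (String × Int))) (list2 : List (List (String × Int))) : List (List (String × Int)) :=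
  (PySem.List.enumerate list1).map
    (fun p => pvAddMissingA p.2 (PySem.List.pyGetD list2 p.1 []))

-- ===== PORT B =====
-- {**d1, **d2, **d1}: Python builds a fresh dict and unpacks the three mappings in turn,
-- each unpack inserting its items left to right with overwrite-in-place semantics —
-- exactly successive PySem.Dict.update of the empty dict; the resulting dict's items.
def merge_dictionary_lists_alt (list1 : List (List (String × Int))) (list2 : List (List (String × Int))) : List (List (String × Int)) :=
  (list1.zip list2).map (fun q =>
    (((PySem.Dict.empty.update q.1).update q.2).update q.1).items)

-- ===== PRECONDITION & SPEC =====
-- Pre_ excludes (i) unequal lengths, where A raises ValueError, and (ii) inner lists with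
-- duplicate keys, which do not encode any Python input (Python dict keys are unique).
def Pre_merge_dictionary_lists (list1 : List (List (String × Int))) (list2 : List (List (String × Int))) : Prop :=
  list1.length = list2.length ∧
  (∀ d ∈ list1, (d.map Prod.fst).Nodup) ∧
  (∀ d ∈ list2, (d.map Prod.fst).Nodup)
instance (list1 : List (List (String × Int))) (list2 : List (List (String × Int))) : Decidable (Pre_merge_dictionary_lists list1 list2) := by unfold Pre_merge_dictionary_lists; infer_instance

def pvWitness_merge_dictionary_lists : (List (List (String × Int))) × (List (List (String × Int))) :=
  ([[("a", 1)], [("x", 7), ("y", 8)]], [[("a", 5), ("b", 2)], [("y", 0), ("z", 3)]])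

def Spec_merge_dictionary_lists (list1 : List (List (String × Int))) (list2 : List (List (String × Int))) (out : List (List (String × Int))) : Prop := out = merge_dictionary_lists_alt list1 list2
instance (list1 : List (List (String × Int))) (list2 : List (List (String × Int))) (out : List (List (String × Int))) : Decidable (Spec_merge_dictionary_lists list1 list2 out) := by unfold Spec_merge_dictionary_lists; infer_instance

-- ===== CLAIM (what is proved, stated in full; the proofs are below) =====
def Claim_equal_merge_dictionary_lists : Prop := ∀ (list1 : List (List (String × Int))) (list2 : List (List (String × Int))), Dom_merge_dictionary_lists list1 list2 → Pre_merge_dictionary_lists list1 list2 → Spec_merge_dictionary_lists list1 list2 (merge_dictionary_lists list1 list2)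

-- ===== LEMMAS AND PROOFS =====

-- canonical form both per-pair merges are reduced to: d1 followed by d2's fresh-keyed items
def pvCanon (d1 d2 : List (String × Int)) : List (String × Int) :=
  d1 ++ d2.filter (fun kv => d1.all (fun p => !(p.1 == kv.1)))

-- A's inner loop equals the canonical form, provided dict2's keys are distinct.
theorem pvA_eq_canon : ∀ (d2 d1 : List (String × Int)),
    (d2.map Prod.fst).Nodup → pvAddMissingA d1 d2 = pvCanon d1 d2 := by
  intro d2
  induction d2 with
  | nil => intro d1 _; simp [pvAddMissingA, pvCanon]
  | cons kv t ih =>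
    intro d1 hnd
    simp only [List.map_cons, List.nodup_cons] at hnd
    obtain ⟨hk, hnd⟩ := hnd
    simp only [pvAddMissingA, List.foldl_cons]
    by_cases hc : d1.any (fun p => p.1 == kv.1)
    · rw [if_pos hc]
      have hall : (d1.all (fun p => !(p.1 == kv.1))) = false := by
        simp only [List.any_eq_true] at hc
        obtain ⟨p, hp, he⟩ := hc
        rw [List.all_eq_false]
        exact ⟨p, hp, by simp [he]⟩
      have := ih d1 hnd
      simp only [pvAddMissingA] at this
      rw [this]
      simp [pvCanon, hall]
    · rw [if_neg hc]
      have := ih (d1 ++ [(kv.1, kv.2)]) hnd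
      simp only [pvAddMissingA] at this
      rw [this]
      simp only [pvCanon]
      have hfil : t.filter (fun q => (d1 ++ [(kv.1, kv.2)]).all (fun p => !(p.1 == q.1)))
          = t.filter (fun q => d1.all (fun p => !(p.1 == q.1))) := by
        apply List.filter_congr
        intro q hq
        have hne : kv.1 ≠ q.1 := by
          intro he
          exact hk (he ▸ List.mem_map_of_mem hq)
        simp [List.all_append, hne]
      rw [hfil, List.filter_cons, if_pos]
      · simp
      · simp only [List.all_eq_true]
        intro p hp
        simp only [List.any_eq_true] at hc
        push Not at hc
        simpa using hc p hp

-- inserting a fresh key appends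
theorem pvInsertFresh (L : List (String × Int)) (k : String) (v : Int)
    (h : L.any (fun p => p.1 == k) = false) :
    PySem.Dict.insert ⟨L⟩ k v = (⟨L ++ [(k, v)]⟩ : PySem.Dict String Int) := by
  simp [PySem.Dict.insert, PySem.Dict.contains, h]

-- inserting a present key rewrites every matching pair in place
theorem pvInsertHit (L : List (String × Int)) (k : String) (v : Int)
    (h : L.any (fun p => p.1 == k) = true) :
    PySem.Dict.insert ⟨L⟩ k v
      = (⟨L.map (fun p => if p.1 == k then (k, v) else p)⟩ : PySem.Dict String Int) := by
  simp [PySem.Dict.insert, PySem.Dict.contains, h]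

-- the rewrite map fixes pairs whose key differs from k
theorem pvMapFixed (L : List (String × Int)) (k : String) (v : Int)
    (h : ∀ p ∈ L, p.1 ≠ k) :
    L.map (fun p => if p.1 == k then (k, v) else p) = L := by
  rw [List.map_congr_left (g := id) (fun p hp => by simp [h p hp]), List.map_id]

-- the rewrite map preserves the key sequence
theorem pvMapKeys (L : List (String × Int)) (k : String) (v : Int) :
    (L.map (fun p => if p.1 == k then (k, v) else p)).map Prod.fst = L.map Prod.fst := by
  rw [List.map_map]
  apply List.map_congr_left
  intro p _
  by_cases hp : p.1 = k
  · simp [hp]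
  · simp [hp]

-- second unpack {**d2}: updates d1's values in place (keys unchanged) and appends d2's fresh keys
theorem pvMid : ∀ (d2 d1' e : List (String × Int)) (K : List String),
    d1'.map Prod.fst = K → (d2.map Prod.fst).Nodup →
    (∀ p ∈ d2, ¬ p.1 ∈ e.map Prod.fst) →
    ∃ d1'', d1''.map Prod.fst = K ∧
      PySem.Dict.update ⟨d1' ++ e⟩ d2
        = (⟨d1'' ++ e ++ d2.filter (fun kv => !(K.any (fun k => k == kv.1)))⟩ : PySem.Dict String Int) := by
  intro d2
  induction d2 with
  | nil =>
    intro d1' e K hK _ _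
    exact ⟨d1', hK, by simp [PySem.Dict.update]⟩
  | cons kv t ih =>
    intro d1' e K hK hnd hdis
    simp only [List.map_cons, List.nodup_cons] at hnd
    obtain ⟨hkt, hnd⟩ := hnd
    have hke : ¬ kv.1 ∈ e.map Prod.fst := hdis kv (List.mem_cons_self)
    have heany : e.any (fun p => p.1 == kv.1) = false := by
      rw [List.any_eq_false]
      intro p hp
      simp only [beq_iff_eq]
      intro hpe
      exact hke (hpe ▸ List.mem_map_of_mem hp)
    simp only [PySem.Dict.update, List.foldl_cons]
    by_cases hc : d1'.any (fun p => p.1 == kv.1) = true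
    · have hin : (d1' ++ e).any (fun p => p.1 == kv.1) = true := by
        rw [List.any_append, hc, Bool.true_or]
      rw [pvInsertHit _ _ _ hin, List.map_append,
        pvMapFixed e kv.1 kv.2 (fun p hp he => hke (he ▸ List.mem_map_of_mem hp))]
      obtain ⟨d1'', hK'', heq⟩ :=
        ih (d1'.map (fun p => if p.1 == kv.1 then (kv.1, kv.2) else p)) e K
          (by rw [pvMapKeys, hK]) hnd (fun p hp => hdis p (List.mem_cons_of_mem _ hp))
      refine ⟨d1'', hK'', ?_⟩
      rw [show (List.foldl (fun acc p => acc.insert p.1 p.2)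
            (⟨d1'.map (fun p => if p.1 == kv.1 then (kv.1, kv.2) else p) ++ e⟩ :
              PySem.Dict String Int) t)
          = PySem.Dict.update ⟨d1'.map (fun p => if p.1 == kv.1 then (kv.1, kv.2) else p) ++ e⟩ t
          from rfl, heq]
      have hkK : K.any (fun k => k == kv.1) = true := by
        rw [List.any_eq_true]
        simp only [List.any_eq_true, beq_iff_eq] at hc
        obtain ⟨p, hp, hpe⟩ := hc
        exact ⟨kv.1, hK ▸ (hpe ▸ List.mem_map_of_mem hp), by simp⟩
      rw [List.filter_cons, if_neg (by simp [hkK])]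
    · have hnotin : (d1' ++ e).any (fun p => p.1 == kv.1) = false := by
        rw [List.any_append, Bool.or_eq_false_iff]
        exact ⟨Bool.eq_false_iff.mpr hc, heany⟩
      rw [pvInsertFresh _ _ _ hnotin]
      have hdis' : ∀ p ∈ t, ¬ p.1 ∈ (e ++ [(kv.1, kv.2)]).map Prod.fst := by
        intro p hp
        simp only [List.map_append, List.mem_append]
        rintro (h1 | h2)
        · exact hdis p (List.mem_cons_of_mem _ hp) h1
        · simp only [List.map_cons, List.map_nil, List.mem_singleton] at h2
          exact hkt (h2 ▸ List.mem_map_of_mem hp)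
      obtain ⟨d1'', hK'', heq⟩ := ih d1' (e ++ [(kv.1, kv.2)]) K hK hnd hdis'
      refine ⟨d1'', hK'', ?_⟩
      rw [show (List.foldl (fun acc p => acc.insert p.1 p.2)
            (⟨d1' ++ e ++ [(kv.1, kv.2)]⟩ : PySem.Dict String Int) t)
          = PySem.Dict.update ⟨d1' ++ (e ++ [(kv.1, kv.2)])⟩ t
          from by rw [List.append_assoc]; rfl, heq]
      have hkK : K.any (fun k => k == kv.1) = false := by
        rw [List.any_eq_false]
        intro x hx
        simp only [beq_iff_eq]
        intro hxe
        apply hc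
        rw [List.any_eq_true]
        rw [← hK] at hx
        obtain ⟨p, hp, hpe⟩ := List.mem_map.mp hx
        exact ⟨p, hp, by simp [hpe, hxe]⟩
      rw [List.filter_cons, if_pos (by simp [hkK])]
      simp [List.append_assoc]

-- third unpack {**d1}: every key is already present in the d1-shaped prefix, so the
-- updates restore d1's original values in place, leaving order and the suffix untouched
theorem pvRestore : ∀ (d1 pre d1' e : List (String × Int)),
    ((pre ++ d1).map Prod.fst).Nodup → d1'.map Prod.fst = d1.map Prod.fst →
    (∀ p ∈ e, ¬ p.1 ∈ d1.map Prod.fst) →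
    PySem.Dict.update ⟨pre ++ d1' ++ e⟩ d1 = (⟨pre ++ d1 ++ e⟩ : PySem.Dict String Int) := by
  intro d1
  induction d1 with
  | nil =>
    intro pre d1' e _ hK _
    have : d1' = [] := by
      cases d1' with
      | nil => rfl
      | cons a b => simp at hK
    simp [this, PySem.Dict.update]
  | cons q t ih =>
    intro pre d1' e hnd hK hdis
    cases d1' with
    | nil => exact absurd hK (by simp)
    | cons q' t' =>
      simp only [List.map_cons] at hK
      obtain ⟨hq, ht'⟩ := List.cons_eq_cons.mp hK
      have hndpre : ¬ q.1 ∈ pre.map Prod.fst := by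
        have := hnd
        rw [List.map_append, List.nodup_append] at this
        intro hmem
        exact this.2.2 _ hmem _ (List.mem_map_of_mem List.mem_cons_self) rfl
      have hndt : ¬ q.1 ∈ t.map Prod.fst := by
        have := hnd
        rw [List.map_append] at this
        have h2 := this.sublist (List.sublist_append_right _ _)
        simp only [List.map_cons, List.nodup_cons] at h2
        exact h2.1
      simp only [PySem.Dict.update, List.foldl_cons]
      have hhit : ((pre ++ (q' :: t')) ++ e).any (fun p => p.1 == q.1) = true := by
        simp only [List.any_append, List.any_cons]
        simp [hq]
      rw [show (⟨pre ++ (q' :: t') ++ e⟩ : PySem.Dict String Int)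
            = ⟨(pre ++ (q' :: t')) ++ e⟩ from rfl,
        pvInsertHit _ _ _ hhit]
      have hmap : ((pre ++ (q' :: t')) ++ e).map (fun p => if p.1 == q.1 then (q.1, q.2) else p)
          = (pre ++ [(q.1, q.2)]) ++ t' ++ e := by
        simp only [List.map_append, List.map_cons]
        rw [pvMapFixed pre q.1 q.2 (fun p hp he => hndpre (he ▸ List.mem_map_of_mem hp)),
          pvMapFixed t' q.1 q.2 (fun p hp he => hndt (he ▸ ht' ▸ List.mem_map_of_mem hp)),
          pvMapFixed e q.1 q.2 (fun p hp he => hdis p hp (by simp [he])),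
          if_pos (by simp [hq])]
        simp [List.append_assoc]
      rw [hmap]
      have := ih (pre ++ [(q.1, q.2)]) t' e
        (by
          have h1 : (pre ++ [(q.1, q.2)]) ++ t = pre ++ (q.1, q.2) :: t := by
            simp [List.append_assoc]
          rw [h1]
          have h2 : (q.1, q.2) = q := rfl
          rw [h2]; exact hnd)
        ht'
        (fun p hp hm => hdis p hp (by simp [hm]))
      rw [show (List.foldl (fun acc p => acc.insert p.1 p.2)
            (⟨pre ++ [(q.1, q.2)] ++ t' ++ e⟩ : PySem.Dict String Int) t)
          = PySem.Dict.update ⟨(pre ++ [(q.1, q.2)]) ++ t' ++ e⟩ t from rfl, this]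
      have h2 : (q.1, q.2) = q := rfl
      simp [List.append_assoc, h2]

-- per-pair: B's triple unpacking equals the canonical form
theorem pvB_pair (d1 d2 : List (String × Int))
    (h1 : (d1.map Prod.fst).Nodup) (h2 : (d2.map Prod.fst).Nodup) :
    (((PySem.Dict.empty.update d1).update d2).update d1).items = pvCanon d1 d2 := by
  -- first unpack: empty.update d1 = ⟨d1⟩
  have step1 : PySem.Dict.empty.update d1 = (⟨d1⟩ : PySem.Dict String Int) := by
    obtain ⟨d1'', hK, heq⟩ := pvMid d1 [] [] [] rfl h1 (by simp)
    have : d1'' = [] := by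
      cases d1'' with
      | nil => rfl
      | cons a b => simp at hK
    rw [show (PySem.Dict.empty : PySem.Dict String Int) = ⟨[] ++ []⟩ from rfl, heq, this]
    simp [List.filter_eq_self.mpr]
  -- second unpack
  obtain ⟨d1'', hK, heq⟩ := pvMid d2 d1 [] (d1.map Prod.fst) rfl h2 (by simp)
  rw [step1, show (⟨d1⟩ : PySem.Dict String Int) = ⟨d1 ++ []⟩ from by simp, heq]
  -- third unpack
  set flt := d2.filter (fun kv => !((d1.map Prod.fst).any (fun k => k == kv.1))) with hflt
  have hdis : ∀ p ∈ flt, ¬ p.1 ∈ d1.map Prod.fst := by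
    intro p hp hm
    have := List.of_mem_filter hp
    simp only [Bool.not_eq_true', List.any_eq_false] at this
    exact absurd (by simp : (p.1 == p.1) = true) (by simpa using this p.1 hm)
  have := pvRestore d1 [] d1'' ([] ++ flt) (by simpa using h1) hK
    (fun p hp => hdis p (by simpa using hp))
  rw [show (⟨d1'' ++ [] ++ flt⟩ : PySem.Dict String Int) = ⟨[] ++ d1'' ++ ([] ++ flt)⟩ from by simp,
    this]
  simp only [List.nil_append]
  -- reconcile the two filter predicates
  unfold pvCanon
  congr 1
  apply List.filter_congr
  intro kv _
  by_cases hm : ∃ p ∈ d1, p.1 = kv.1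
  · obtain ⟨p, hp, he⟩ := hm
    have hl : ((d1.map Prod.fst).any fun k => k == kv.1) = true := by
      rw [List.any_eq_true]
      exact ⟨kv.1, he ▸ List.mem_map_of_mem hp, by simp⟩
    have hr : (d1.all fun p => !(p.1 == kv.1)) = false := by
      rw [List.all_eq_false]
      exact ⟨p, hp, by simp [he]⟩
    rw [hl, hr]
    rfl
  · have hl : ((d1.map Prod.fst).any fun k => k == kv.1) = false := by
      rw [List.any_eq_false]
      intro x hx
      obtain ⟨p, hp, rfl⟩ := List.mem_map.mp hx
      simp only [beq_iff_eq]
      exact fun he => hm ⟨p, hp, he⟩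
    have hr : (d1.all fun p => !(p.1 == kv.1)) = true := by
      rw [List.all_eq_true]
      intro p hp
      simp only [Bool.not_eq_true', beq_eq_false_iff_ne]
      exact fun he => hm ⟨p, hp, he⟩
    rw [hl, hr]
    rfl

-- list2[i+1] seen from (y :: list2) is list2[i] (nonnegative index).
theorem pvPyGetD_cons_shift {α : Type} (x : α) (t : List α) (i : Int) (h : 0 ≤ i) (d : α) :
    PySem.List.pyGetD (x :: t) (i + 1) d = PySem.List.pyGetD t i d := by
  simp only [PySem.List.pyGetD, PySem.List.pyGet?, PySem.List.pyIdx?, List.length_cons]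
  rw [if_pos (by omega : (0:Int) ≤ i + 1), if_pos h]
  by_cases hl : i < (t.length : Int)
  · rw [if_pos (by push_cast; omega), if_pos hl]
    have h2 : (i + 1).toNat = i.toNat + 1 := by omega
    simp [h2]
  · rw [if_neg (by push_cast; omega), if_neg hl]
    simp

-- shifting A's enumerate start by one cancels one cons of list2
theorem pvEnumShift : ∀ (t : List (List (String × Int))) (y : List (String × Int))
    (l2 : List (List (String × Int))) (s : Int), 0 ≤ s →
    (PySem.List.enumerate t (s + 1)).map
      (fun p => pvAddMissingA p.2 (PySem.List.pyGetD (y :: l2) p.1 [])) =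
    (PySem.List.enumerate t s).map
      (fun p => pvAddMissingA p.2 (PySem.List.pyGetD l2 p.1 [])) := by
  intro t
  induction t with
  | nil => intro y l2 s hs; simp [PySem.List.enumerate_nil]
  | cons x xs ih =>
    intro y l2 s hs
    rw [PySem.List.enumerate_cons, PySem.List.enumerate_cons]
    simp only [List.map_cons]
    rw [pvPyGetD_cons_shift y l2 s hs, ih y l2 (s + 1) (by omega)]

theorem pvMerge_eq : ∀ (l1 l2 : List (List (String × Int))), l1.length = l2.length →
    (∀ d ∈ l1, (d.map Prod.fst).Nodup) →
    (∀ d ∈ l2, (d.map Prod.fst).Nodup) →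
    merge_dictionary_lists l1 l2 = merge_dictionary_lists_alt l1 l2 := by
  intro l1
  induction l1 with
  | nil =>
    intro l2 hl _ _
    simp [merge_dictionary_lists, merge_dictionary_lists_alt, PySem.List.enumerate_nil]
  | cons x t ih =>
    intro l2 hl hnd1 hnd2
    cases l2 with
    | nil => simp at hl
    | cons y t2 =>
      simp only [merge_dictionary_lists, merge_dictionary_lists_alt] at *
      rw [PySem.List.enumerate_cons]
      simp only [List.map_cons, List.zip_cons_cons]
      have h0 : PySem.List.pyGetD (y :: t2) (0:Int) [] = y := by
        simp [PySem.List.pyGetD, PySem.List.pyGet?, PySem.List.pyIdx?]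
      rw [h0, pvEnumShift t y t2 0 le_rfl]
      rw [ih t2 (by simpa using hl)
        (fun d hd => hnd1 d (List.mem_cons_of_mem _ hd))
        (fun d hd => hnd2 d (List.mem_cons_of_mem _ hd))]
      rw [pvA_eq_canon y x (hnd2 y List.mem_cons_self),
        pvB_pair x y (hnd1 x List.mem_cons_self) (hnd2 y List.mem_cons_self)]

-- ===== VERDICT (by name: the statement is the Claim_ definition above) =====
theorem merge_dictionary_lists_spec : Claim_equal_merge_dictionary_lists := by
  intro l1 l2 _ hpre
  unfold Spec_merge_dictionary_lists
  exact pvMerge_eq l1 l2 hpre.1 hpre.2.1 hpre.2.2
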